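-- pv_equiv track=rewrite | github.com/rcmccartney/genprevtech_challenge | Library.py | last_atrocity
-- ===== SOURCE A (Python) =====
-- def last_atrocity(buffer, key, day, tr=0):
--     """
--     Returns the days since last atrocity occurred
--     If provided, the day last atrocity occurred must be before the trailing factor
--     First tests if key exists in the buffer, if not uses the last day of the period
--     (which represents all time).
--     :param buffer: buffer of atrocity days that occurred in given region,
--             such that buf[key] = [day1, day2,...]
--     :param day: the atrocity must occur before this day
--     :param tr: trailing time that the atrocity must occur before
--     :return: days ago that it occurred
--     """
--     if key in buffer:
--         day -= tr
--         # index points to last day an atrocity occurred in this location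
--         index = len(buffer[key]) - 1
--         # buffer[key][index] is an atrocity date, want to find first <= day
--         while index >= 0 and buffer[key][index] > day:
--             index -= 1
--         if index >= 0:
--             return day - buffer[key][index]
--     return 10000  # used for infinite into the past
-- ===== SOURCE B (Python) =====
-- def last_atrocity(buffer, key, day, tr=0):
--     """Single forward pass: track the value at the last index whose date is <= day - tr."""
--     days = buffer.get(key)
--     if days is None:
--         return 10000
--     day -= tr
--     last = None
--     for d in days:
--         if d <= day:
--             last = d
--     return 10000 if last is None else day - last
-- ===== Notes on version B (the rewrite author's own statement) =====
-- stated objective: alternative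
-- what changed: A scans the date list backwards with an index, decrementing past entries greater than the cutoff; B makes one forward fold keeping the most recent entry <= cutoff, with a single dict lookup instead of repeated buffer[key] accesses.
import Mathlib
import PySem

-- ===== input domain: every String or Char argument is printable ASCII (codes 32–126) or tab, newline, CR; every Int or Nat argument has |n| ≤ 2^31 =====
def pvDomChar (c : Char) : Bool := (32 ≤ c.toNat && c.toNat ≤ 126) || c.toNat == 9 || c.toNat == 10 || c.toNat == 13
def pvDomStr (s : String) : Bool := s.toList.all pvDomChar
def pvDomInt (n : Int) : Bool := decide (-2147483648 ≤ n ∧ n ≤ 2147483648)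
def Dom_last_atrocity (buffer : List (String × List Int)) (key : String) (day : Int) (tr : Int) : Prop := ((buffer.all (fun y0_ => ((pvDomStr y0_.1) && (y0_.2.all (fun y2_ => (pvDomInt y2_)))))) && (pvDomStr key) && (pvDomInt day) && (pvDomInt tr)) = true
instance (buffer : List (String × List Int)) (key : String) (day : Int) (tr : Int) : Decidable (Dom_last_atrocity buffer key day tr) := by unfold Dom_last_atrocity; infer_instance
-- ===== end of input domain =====

-- B replaces A's backward index-decrement scan by one forward fold that keeps the
-- latest date ≤ the cutoff (objective: alternative structure, same cost).

-- ===== PORT A =====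
-- A's while-loop: index starts at len-1 and is decremented while buffer[key][index] > day;
-- fuel = index + 1, so `aLoop xs day (i+1)` is the loop with current index i.
def aLoop (xs : List Int) (day : Int) : Nat → Option Nat
  | 0 => none
  | (i+1) => if xs.getD i 0 > day then aLoop xs day i else some i

def last_atrocity (buffer : List (String × List Int)) (key : String) (day : Int) (tr : Int) : Int :=
  match (PySem.Dict.ofList buffer).get? key with
  | none => 10000
  | some xs =>
    let day := day - tr
    match aLoop xs day xs.length with
    | some i => day - xs.getD i 0
    | none => 10000

-- ===== PORT B =====
def last_atrocity_alt (buffer : List (String × List Int)) (key : String) (day : Int) (tr : Int) : Int :=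
  match (PySem.Dict.ofList buffer).get? key with
  | none => 10000
  | some xs =>
    let day := day - tr
    match xs.foldl (fun last d => if d ≤ day then some d else last) none with
    | none => 10000
    | some b => day - b

-- ===== PRECONDITION & SPEC =====
def Spec_last_atrocity (buffer : List (String × List Int)) (key : String) (day : Int) (tr : Int) (out : Int) : Prop := out = last_atrocity_alt buffer key day tr
instance (buffer : List (String × List Int)) (key : String) (day : Int) (tr : Int) (out : Int) : Decidable (Spec_last_atrocity buffer key day tr out) := by unfold Spec_last_atrocity; infer_instance

-- ===== CLAIM (what is proved, stated in full; the proofs are below) =====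
def Claim_equal_last_atrocity : Prop := ∀ (buffer : List (String × List Int)) (key : String) (day : Int) (tr : Int), Dom_last_atrocity buffer key day tr → Spec_last_atrocity buffer key day tr (last_atrocity buffer key day tr)

-- ===== LEMMAS AND PROOFS =====

-- The backward scan over the first n entries returns (through its index) the same date
-- as the forward fold over the first n entries.
theorem aLoop_eq_foldl (xs : List Int) (day : Int) (n : Nat) (hn : n ≤ xs.length) :
    (aLoop xs day n).map (fun i => xs.getD i 0)
      = (xs.take n).foldl (fun last d => if d ≤ day then some d else last) none := by
  induction n with
  | zero => simp [aLoop]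
  | succ m ih =>
    have hm : m < xs.length := hn
    have htake : xs.take (m+1) = xs.take m ++ [xs[m]] := by
      rw [List.take_add_one, List.getElem?_eq_getElem hm]; rfl
    rw [htake, List.foldl_append, ← ih (Nat.le_of_lt hm)]
    have hget : xs.getD m 0 = xs[m] := List.getD_eq_getElem xs 0 hm
    simp only [aLoop, List.foldl_cons, List.foldl_nil]
    by_cases h : xs[m] ≤ day
    · rw [if_neg (by rw [hget]; omega), if_pos h, Option.map_some, hget]
    · rw [if_pos (by rw [hget]; omega), if_neg h]

-- ===== VERDICT (by name: the statement is the Claim_ definition above) =====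
theorem last_atrocity_spec : Claim_equal_last_atrocity := by
  intro buffer key day tr _
  unfold Spec_last_atrocity last_atrocity last_atrocity_alt
  cases h : (PySem.Dict.ofList buffer).get? key with
  | none => rfl
  | some xs =>
    simp only []
    have := aLoop_eq_foldl xs (day - tr) xs.length (le_refl _)
    rw [List.take_length] at this
    rw [← this]
    cases aLoop xs (day - tr) xs.length <;> simp
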